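-- pv_equiv track=rewrite | github.com/jwekavanagh/project-nod | python/src/agentskeptic/kernel/resolve_expectation.py | _normalize_sorted_identity_eq
-- ===== SOURCE A (Python) =====
-- from typing import Any, Literal, TypedDict, Union
--
-- REGISTRY_RESOLVER_CODE = {
--     "TABLE_POINTER_INVALID": "TABLE_POINTER_INVALID",
--     "TABLE_SPEC_INVALID": "TABLE_SPEC_INVALID",
--     "INVALID_IDENTIFIER": "INVALID_IDENTIFIER",
--     "REQUIRED_FIELDS_POINTER_MISSING": "REQUIRED_FIELDS_POINTER_MISSING",
--     "REQUIRED_FIELDS_NOT_OBJECT": "REQUIRED_FIELDS_NOT_OBJECT",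
--     "REQUIRED_FIELDS_VALUE_UNDEFINED": "REQUIRED_FIELDS_VALUE_UNDEFINED",
--     "REQUIRED_FIELDS_VALUE_NOT_SCALAR": "REQUIRED_FIELDS_VALUE_NOT_SCALAR",
--     "STRING_SPEC_POINTER_MISSING": "STRING_SPEC_POINTER_MISSING",
--     "STRING_SPEC_TYPE": "STRING_SPEC_TYPE",
--     "STRING_SPEC_EMPTY": "STRING_SPEC_EMPTY",
--     "KEY_VALUE_POINTER_MISSING": "KEY_VALUE_POINTER_MISSING",
--     "KEY_VALUE_NOT_SCALAR": "KEY_VALUE_NOT_SCALAR",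
--     "KEY_VALUE_SPEC_INVALID": "KEY_VALUE_SPEC_INVALID",
--     "EQUALITY_DUPLICATE_COLUMN": "EQUALITY_DUPLICATE_COLUMN",
-- }
--
-- class IdentityEqPair(TypedDict):
--     column: str
--     value: str
--
-- def _normalize_sorted_identity_eq(
--     raw: list[dict[str, str]], label_prefix: str
-- ) -> tuple[bool, list[IdentityEqPair] | None, str, str]:
--     sorted_pairs = sorted(raw, key=lambda p: p["column"])
--     for i in range(1, len(sorted_pairs)):
--         if sorted_pairs[i]["column"] == sorted_pairs[i - 1]["column"]:
--             return (
--                 False,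
--                 None,
--                 REGISTRY_RESOLVER_CODE["EQUALITY_DUPLICATE_COLUMN"],
--                 f"{label_prefix}duplicate equality column: {sorted_pairs[i]['column']}",
--             )
--     out: list[IdentityEqPair] = [{"column": p["column"], "value": p["value"]} for p in sorted_pairs]
--     return True, out, "", ""
-- ===== SOURCE B (Python) =====
-- REGISTRY_RESOLVER_CODE = {
--     "TABLE_POINTER_INVALID": "TABLE_POINTER_INVALID",
--     "TABLE_SPEC_INVALID": "TABLE_SPEC_INVALID",
--     "INVALID_IDENTIFIER": "INVALID_IDENTIFIER",
--     "REQUIRED_FIELDS_POINTER_MISSING": "REQUIRED_FIELDS_POINTER_MISSING",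
--     "REQUIRED_FIELDS_NOT_OBJECT": "REQUIRED_FIELDS_NOT_OBJECT",
--     "REQUIRED_FIELDS_VALUE_UNDEFINED": "REQUIRED_FIELDS_VALUE_UNDEFINED",
--     "REQUIRED_FIELDS_VALUE_NOT_SCALAR": "REQUIRED_FIELDS_VALUE_NOT_SCALAR",
--     "STRING_SPEC_POINTER_MISSING": "STRING_SPEC_POINTER_MISSING",
--     "STRING_SPEC_TYPE": "STRING_SPEC_TYPE",
--     "STRING_SPEC_EMPTY": "STRING_SPEC_EMPTY",
--     "KEY_VALUE_POINTER_MISSING": "KEY_VALUE_POINTER_MISSING",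
--     "KEY_VALUE_NOT_SCALAR": "KEY_VALUE_NOT_SCALAR",
--     "KEY_VALUE_SPEC_INVALID": "KEY_VALUE_SPEC_INVALID",
--     "EQUALITY_DUPLICATE_COLUMN": "EQUALITY_DUPLICATE_COLUMN",
-- }
--
--
-- def _normalize_sorted_identity_eq(raw, label_prefix):
--     # Count column frequencies in one pass; a duplicate exists iff some count > 1,
--     # and the smallest duplicated column is exactly the one A's adjacent scan reports.
--     counts = {}
--     for p in raw:
--         c = p["column"]
--         counts[c] = counts.get(c, 0) + 1
--     dups = [c for c, n in counts.items() if n > 1]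
--     if dups:
--         return (
--             False,
--             None,
--             REGISTRY_RESOLVER_CODE["EQUALITY_DUPLICATE_COLUMN"],
--             f"{label_prefix}duplicate equality column: {min(dups)}",
--         )
--     return (
--         True,
--         [{"column": p["column"], "value": p["value"]} for p in sorted(raw, key=lambda p: p["column"])],
--         "",
--         "",
--     )
-- ===== Notes on version B (the rewrite author's own statement) =====
-- stated objective: alternative
-- what changed: Duplicate detection is a single-pass column frequency table plus min over the >1 entries instead of A's adjacent-pair scan of the sorted list; sorting happens only on the success path.
import Mathlib
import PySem

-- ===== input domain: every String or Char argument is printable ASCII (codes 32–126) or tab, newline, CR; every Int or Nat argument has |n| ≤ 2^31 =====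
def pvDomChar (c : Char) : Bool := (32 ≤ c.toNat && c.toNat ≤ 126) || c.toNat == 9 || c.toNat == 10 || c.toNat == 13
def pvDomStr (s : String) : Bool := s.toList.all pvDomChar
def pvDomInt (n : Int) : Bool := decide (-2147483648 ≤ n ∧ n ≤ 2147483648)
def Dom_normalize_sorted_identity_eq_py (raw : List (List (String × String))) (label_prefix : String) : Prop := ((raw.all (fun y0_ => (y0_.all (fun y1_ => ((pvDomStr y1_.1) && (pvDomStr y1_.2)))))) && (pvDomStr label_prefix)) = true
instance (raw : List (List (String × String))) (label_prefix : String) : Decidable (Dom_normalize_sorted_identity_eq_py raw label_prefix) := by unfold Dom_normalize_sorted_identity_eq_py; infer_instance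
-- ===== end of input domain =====

-- B replaces A's adjacent-pair scan of the sorted list by a one-pass column frequency
-- table and a min over the duplicated columns (objective: alternative, same cost).

-- shared helpers: p["column"] / p["value"] (total forms; Pre_ guarantees the key is present)
def pvCol (p : List (String × String)) : String := PySem.Dict.getD ⟨p⟩ "column" ""
def pvVal (p : List (String × String)) : String := PySem.Dict.getD ⟨p⟩ "value" ""

-- ===== PORT A =====
def REGISTRY_RESOLVER_CODE : PySem.Dict String String := ⟨[
  ("TABLE_POINTER_INVALID", "TABLE_POINTER_INVALID"),
  ("TABLE_SPEC_INVALID", "TABLE_SPEC_INVALID"),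
  ("INVALID_IDENTIFIER", "INVALID_IDENTIFIER"),
  ("REQUIRED_FIELDS_POINTER_MISSING", "REQUIRED_FIELDS_POINTER_MISSING"),
  ("REQUIRED_FIELDS_NOT_OBJECT", "REQUIRED_FIELDS_NOT_OBJECT"),
  ("REQUIRED_FIELDS_VALUE_UNDEFINED", "REQUIRED_FIELDS_VALUE_UNDEFINED"),
  ("REQUIRED_FIELDS_VALUE_NOT_SCALAR", "REQUIRED_FIELDS_VALUE_NOT_SCALAR"),
  ("STRING_SPEC_POINTER_MISSING", "STRING_SPEC_POINTER_MISSING"),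
  ("STRING_SPEC_TYPE", "STRING_SPEC_TYPE"),
  ("STRING_SPEC_EMPTY", "STRING_SPEC_EMPTY"),
  ("KEY_VALUE_POINTER_MISSING", "KEY_VALUE_POINTER_MISSING"),
  ("KEY_VALUE_NOT_SCALAR", "KEY_VALUE_NOT_SCALAR"),
  ("KEY_VALUE_SPEC_INVALID", "KEY_VALUE_SPEC_INVALID"),
  ("EQUALITY_DUPLICATE_COLUMN", "EQUALITY_DUPLICATE_COLUMN")]⟩

-- the 'for i in range(1, len(sorted_pairs))' early-return loop of A
def pvLoopA (sp : List (List (String × String))) : List Int → Option String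
  | [] => none
  | i :: rest =>
    if pvCol (PySem.List.pyGetD sp i []) == pvCol (PySem.List.pyGetD sp (i - 1) []) then
      some (pvCol (PySem.List.pyGetD sp i []))
    else pvLoopA sp rest

def normalize_sorted_identity_eq_py (raw : List (List (String × String))) (label_prefix : String) : Bool × (Option (List (List (String × String)))) × String × String :=
  let sorted_pairs := PySem.List.sorted raw pvCol
  match pvLoopA sorted_pairs (PySem.List.pyRange 1 (sorted_pairs.length : Int)) with
  | some c =>
      (false, none, REGISTRY_RESOLVER_CODE.getD "EQUALITY_DUPLICATE_COLUMN" "",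
       label_prefix ++ "duplicate equality column: " ++ c)
  | none =>
      (true, some (sorted_pairs.map (fun p => [("column", pvCol p), ("value", pvVal p)])), "", "")

-- ===== PORT B =====
def normalize_sorted_identity_eq_py_alt (raw : List (List (String × String))) (label_prefix : String) : Bool × (Option (List (List (String × String)))) × String × String :=
  -- counts[c] = counts.get(c, 0) + 1 over raw
  let counts : PySem.Dict String Int :=
    raw.foldl (fun d p => d.insert (pvCol p) (d.getD (pvCol p) 0 + 1)) PySem.Dict.empty
  -- dups = [c for c, n in counts.items() if n > 1]
  let dups := (counts.items.filter (fun kv => 1 < kv.2)).map (fun kv => kv.1)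
  -- 'if dups: … min(dups)' — min? is none exactly when dups is empty
  match PySem.List.min? dups (fun c => c) with
  | some m =>
      (false, none, REGISTRY_RESOLVER_CODE.getD "EQUALITY_DUPLICATE_COLUMN" "",
       label_prefix ++ "duplicate equality column: " ++ m)
  | none =>
      (true, some ((PySem.List.sorted raw pvCol).map (fun p => [("column", pvCol p), ("value", pvVal p)])), "", "")

-- ===== PRECONDITION & SPEC =====
-- Pre_ excludes exactly the inputs where Python A raises KeyError: a pair without a
-- "column" key, or — when all columns are distinct, so the success path is reached —
-- a pair without a "value" key.
def Pre_normalize_sorted_identity_eq_py (raw : List (List (String × String))) (label_prefix : String) : Prop :=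
  (raw.all (fun p => p.any (fun kv => kv.1 == "column"))) = true ∧
  ((raw.map pvCol).Nodup → (raw.all (fun p => p.any (fun kv => kv.1 == "value"))) = true)
instance (raw : List (List (String × String))) (label_prefix : String) : Decidable (Pre_normalize_sorted_identity_eq_py raw label_prefix) := by unfold Pre_normalize_sorted_identity_eq_py; infer_instance

def pvWitness_normalize_sorted_identity_eq_py : (List (List (String × String))) × String :=
  ([[("column", "b"), ("value", "1")], [("column", "a"), ("value", "2")]], "eq: ")

def Spec_normalize_sorted_identity_eq_py (raw : List (List (String × String))) (label_prefix : String) (out : Bool × (Option (List (List (String × String)))) × String × String) : Prop := out = normalize_sorted_identity_eq_py_alt raw label_prefix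
instance (raw : List (List (String × String))) (label_prefix : String) (out : Bool × (Option (List (List (String × String)))) × String × String) : Decidable (Spec_normalize_sorted_identity_eq_py raw label_prefix out) := by unfold Spec_normalize_sorted_identity_eq_py; infer_instance

-- ===== CLAIM (what is proved, stated in full; the proofs are below) =====
def Claim_equal_normalize_sorted_identity_eq_py : Prop := ∀ (raw : List (List (String × String))) (label_prefix : String), Dom_normalize_sorted_identity_eq_py raw label_prefix → Pre_normalize_sorted_identity_eq_py raw label_prefix → Spec_normalize_sorted_identity_eq_py raw label_prefix (normalize_sorted_identity_eq_py raw label_prefix)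

-- ===== LEMMAS AND PROOFS =====

-- proof-side view of A's loop: adjacent-duplicate scan over the column list
def pvAdj : List String → Option String
  | [] => none
  | [_] => none
  | a :: b :: t => if b = a then some b else pvAdj (b :: t)

theorem pvAdj_cons_cons (a b : String) (t : List String) :
    pvAdj (a :: b :: t) = if b = a then some b else pvAdj (b :: t) := rfl

theorem pvLoopA_eq_adj (sp : List (List (String × String))) (k : Nat) :
    pvLoopA sp (PySem.List.pyRange ((k : Int) + 1) (sp.length : Int)) =
      pvAdj ((sp.map pvCol).drop k) := by
  by_cases h : k + 1 < sp.length
  · rw [PySem.List.pyRange_one_cons (by exact_mod_cast h)]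
    have hk1 : ((k : Int) + 1).toNat = k + 1 := by omega
    have hk0 : ((k : Int) + 1 - 1).toNat = k := by omega
    rw [show pvLoopA sp (((k : Int) + 1) :: PySem.List.pyRange ((k : Int) + 1 + 1) (sp.length : Int)) =
      (if pvCol (PySem.List.pyGetD sp ((k : Int) + 1) []) == pvCol (PySem.List.pyGetD sp ((k : Int) + 1 - 1) []) then
        some (pvCol (PySem.List.pyGetD sp ((k : Int) + 1) []))
      else pvLoopA sp (PySem.List.pyRange ((k : Int) + 1 + 1) (sp.length : Int))) from rfl]
    rw [PySem.List.pyGetD_eq_getElem sp [] (by omega) (by exact_mod_cast h),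
        PySem.List.pyGetD_eq_getElem sp [] (by omega) (by omega)]
    rw [List.drop_eq_getElem_cons (l := sp.map pvCol) (by simpa using by omega),
        List.drop_eq_getElem_cons (l := sp.map pvCol) (by simpa using h)]
    rw [pvAdj_cons_cons]
    simp only [hk1, hk0, List.getElem_map, beq_iff_eq]
    split_ifs with he
    · rfl
    · have := pvLoopA_eq_adj sp (k + 1)
      rw [show ((k : Int) + 1 + 1) = (((k+1 : Nat) : Int) + 1) by push_cast; ring]
      rw [this, List.drop_eq_getElem_cons (l := sp.map pvCol) (by simpa using h)]
      simp [List.getElem_map]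
  · rw [PySem.List.pyRange_one_eq_nil (by omega)]
    have : ((sp.map pvCol).drop k).length ≤ 1 := by simp; omega
    rcases hd : (sp.map pvCol).drop k with _ | ⟨a, _ | ⟨b, t⟩⟩
    · rfl
    · rfl
    · rw [hd] at this; simp at this
termination_by sp.length - k

theorem pv_head_lt (a b : String) (t : List String)
    (hs : (a :: b :: t).Pairwise (· ≤ ·)) (hne : b ≠ a) :
    ∀ x ∈ b :: t, a < x := by
  intro x hx
  have hab : a ≤ b := (List.pairwise_cons.mp hs).1 b (by simp)
  have hax : a ≤ x := (List.pairwise_cons.mp hs).1 x hx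
  rcases List.mem_cons.mp hx with rfl | hx'
  · exact lt_of_le_of_ne hab (Ne.symm hne)
  · have hbx : b ≤ x := (List.pairwise_cons.mp (List.pairwise_cons.mp hs).2).1 x hx'
    exact lt_of_lt_of_le (lt_of_le_of_ne hab (Ne.symm hne)) hbx

theorem pvAdj_none_iff (cs : List String) (hs : cs.Pairwise (· ≤ ·)) :
    pvAdj cs = none ↔ cs.Nodup := by
  induction cs with
  | nil => simp [pvAdj]
  | cons a t ih =>
    cases t with
    | nil => simp [pvAdj]
    | cons b t' =>
      rw [pvAdj_cons_cons]
      split_ifs with he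
      · subst he
        simp
      · rw [ih (List.pairwise_cons.mp hs).2]
        have hnm : a ∉ b :: t' := fun hm => absurd rfl (ne_of_lt (pv_head_lt a b t' hs he a hm)).symm
        simp [List.nodup_cons, hnm]

theorem pvAdj_some (cs : List String) (hs : cs.Pairwise (· ≤ ·)) (c : String)
    (h : pvAdj cs = some c) :
    2 ≤ cs.count c ∧ ∀ d, 2 ≤ cs.count d → c ≤ d := by
  induction cs with
  | nil => simp [pvAdj] at h
  | cons a t ih =>
    cases t with
    | nil => simp [pvAdj] at h
    | cons b t' =>
      rw [pvAdj_cons_cons] at h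
      split_ifs at h with he
      · cases h; subst he
        constructor
        · simp
        · intro d hd
          have hdm : d ∈ c :: c :: t' := List.count_pos_iff.mp (by omega)
          rcases List.pairwise_cons.mp hs with ⟨hle, _⟩
          rcases List.mem_cons.mp hdm with rfl | hdm'
          · rfl
          · exact hle d hdm'
      · rcases ih (List.pairwise_cons.mp hs).2 h with ⟨hc, hmin⟩
        have hanm : a ∉ b :: t' := fun hm => absurd rfl (ne_of_lt (pv_head_lt a b t' hs he a hm)).symm
        have hcm : c ∈ b :: t' := List.count_pos_iff.mp (by omega)
        have hca : c ≠ a := fun hca => hanm (hca ▸ hcm)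
        constructor
        · rw [List.count_cons_of_ne hca.symm]; exact hc
        · intro d hd
          by_cases hda : d = a
          · subst hda
            rw [List.count_cons_self] at hd
            have : d ∉ b :: t' := hanm
            rw [List.count_eq_zero_of_not_mem this] at hd
            omega
          · exact hmin d (by rwa [List.count_cons_of_ne (Ne.symm hda)] at hd)

theorem pv_mem_dups (cols : List String) (c : String) :
    c ∈ (((PySem.Dict.counter cols).items.filter (fun kv => 1 < kv.2)).map (fun kv => kv.1)) ↔
      2 ≤ cols.count c := by
  simp only [PySem.Dict.items_counter, List.mem_map, List.mem_filter]
  constructor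
  · rintro ⟨⟨k, n⟩, ⟨⟨k', hk', hkeq⟩, hgt⟩, rfl⟩
    cases hkeq
    simp only [decide_eq_true_eq] at hgt
    show 2 ≤ cols.count k; omega
  · intro h
    refine ⟨(c, (cols.count c : Int)), ⟨⟨c, ?_, rfl⟩, by simp; omega⟩, rfl⟩
    rw [PySem.Set.mem_ofList]
    exact List.count_pos_iff.mp (by omega)

-- ===== VERDICT (by name: the statement is the Claim_ definition above) =====
theorem normalize_sorted_identity_eq_py_spec : Claim_equal_normalize_sorted_identity_eq_py := by
  intro raw lp _ _
  unfold Spec_normalize_sorted_identity_eq_py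
  have hcounts : raw.foldl (fun d p => d.insert (pvCol p) (d.getD (pvCol p) 0 + 1)) PySem.Dict.empty
      = PySem.Dict.counter (raw.map pvCol) := by
    rw [← PySem.Dict.foldl_insert_getD_add_one_eq_counter, List.foldl_map]
  have hloop := pvLoopA_eq_adj (PySem.List.sorted raw pvCol) 0
  simp only [Nat.cast_zero, zero_add, List.drop_zero] at hloop
  have hpair : ((PySem.List.sorted raw pvCol).map pvCol).Pairwise (· ≤ ·) :=
    PySem.List.sorted_map_key_pairwise raw pvCol
  have hperm : ((PySem.List.sorted raw pvCol).map pvCol).Perm (raw.map pvCol) :=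
    (PySem.List.sorted_perm raw pvCol false).map pvCol
  unfold normalize_sorted_identity_eq_py normalize_sorted_identity_eq_py_alt
  simp only [hcounts]
  cases hadj : pvAdj ((PySem.List.sorted raw pvCol).map pvCol) with
  | none =>
    rw [hloop, hadj]
    have hnd : (raw.map pvCol).Nodup := hperm.nodup_iff.mp ((pvAdj_none_iff _ hpair).mp hadj)
    have hdups : (((PySem.Dict.counter (raw.map pvCol)).items.filter (fun kv => 1 < kv.2)).map (fun kv => kv.1)) = [] := by
      rw [List.eq_nil_iff_forall_not_mem]
      intro c hc
      have := (pv_mem_dups _ c).mp hc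
      have := List.nodup_iff_count_le_one.mp hnd c
      omega
    rw [hdups]
    rfl
  | some c =>
    rw [hloop, hadj]
    rcases pvAdj_some _ hpair c hadj with ⟨hc2, hcmin⟩
    have hcd : c ∈ (((PySem.Dict.counter (raw.map pvCol)).items.filter (fun kv => 1 < kv.2)).map (fun kv => kv.1)) := by
      rw [pv_mem_dups]
      rwa [hperm.count_eq] at hc2
    cases hmin : PySem.List.min? (((PySem.Dict.counter (raw.map pvCol)).items.filter (fun kv => 1 < kv.2)).map (fun kv => kv.1)) (fun c => c) with
    | none =>
      rw [PySem.List.min?_eq_none_iff] at hmin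
      rw [hmin] at hcd
      simp at hcd
    | some m =>
      have hmc : m ≤ c := PySem.List.min?_isMin hmin c hcd
      have hm2 : 2 ≤ ((PySem.List.sorted raw pvCol).map pvCol).count m := by
        have := (pv_mem_dups _ m).mp (PySem.List.min?_mem hmin)
        rwa [hperm.count_eq]
      have : c = m := le_antisymm (hcmin m hm2) hmc
      rw [this]
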